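-- pv_equiv track=rewrite | github.com/zhanpeiyi0703/- | 随机.py | encode_direct
-- ===== SOURCE A (Python) =====
-- def encode_direct(data):
--     # 创建一个空字典用于保存已存在的字符串及其对应的数值
--     mapping = {}
--     # 初始化数值
--     count = 1
--     # 编码数据
--     encoded_data = []
--     for item in data:
--         # 如果字符串在字典中不存在，则将其添加到字典中，并为其分配一个新的数值
--         if item not in mapping:
--             mapping[item] = count
--             count += 1
--         # 将字符串转换为对应的数值
--         encoded_data.append(mapping[item])
--     return encoded_data
-- ===== SOURCE B (Python) =====
-- def encode_direct(data):
--     # Mapping-free: the code of each element is the number of distinct items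
--     # in the prefix of data that ends at that element's first occurrence.
--     return [len(set(data[:data.index(x) + 1])) for x in data]
-- ===== Notes on version B (the rewrite author's own statement) =====
-- stated objective: alternative
-- what changed: Drops A's mapping dict and running counter entirely: each element's code is computed independently as the number of distinct items in the prefix ending at its first occurrence (data.index + set of a slice), trading A's single stateful pass for per-element prefix scans.
import Mathlib
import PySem

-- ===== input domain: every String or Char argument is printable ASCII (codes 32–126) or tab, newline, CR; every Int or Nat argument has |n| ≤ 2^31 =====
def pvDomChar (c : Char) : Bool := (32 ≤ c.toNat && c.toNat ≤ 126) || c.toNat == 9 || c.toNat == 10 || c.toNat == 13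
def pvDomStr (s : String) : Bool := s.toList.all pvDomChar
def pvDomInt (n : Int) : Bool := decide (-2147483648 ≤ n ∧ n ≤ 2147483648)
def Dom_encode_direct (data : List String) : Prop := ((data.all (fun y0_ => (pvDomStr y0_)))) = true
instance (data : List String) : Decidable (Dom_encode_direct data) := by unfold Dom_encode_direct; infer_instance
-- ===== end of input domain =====

-- B drops A's mapping dict and counter: each element's code is the number of distinct
-- items in the prefix ending at its first occurrence (objective: alternative; B is O(n^2)).


-- ===== PORT A =====
-- state: (mapping, count, encoded_data); `mapping[item]` is looked up after the possible insert,
-- modelled by getD (exact here: the key is always present at that point).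
def encode_direct (data : List String) : List Int :=
  (data.foldl
    (fun (s : PySem.Dict String Int × Int × List Int) item =>
      if s.1.contains item then
        (s.1, s.2.1, s.2.2 ++ [s.1.getD item 0])
      else
        let m' := s.1.insert item s.2.1
        (m', s.2.1 + 1, s.2.2 ++ [m'.getD item 0]))
    (PySem.Dict.empty, 1, [])).2.2

-- ===== PORT B =====
-- [len(set(data[:data.index(x) + 1])) for x in data]; data.index(x) always succeeds
-- (x is drawn from data), so the ValueError branch of index? is unreachable (getD 0).
def encode_direct_alt (data : List String) : List Int :=
  data.map (fun x =>
    let i := (PySem.List.index? data x).getD 0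
    ((PySem.Set.ofList (PySem.List.slice data none (some ((i : Int) + 1)))).length : Int))

-- ===== PRECONDITION & SPEC =====
def Spec_encode_direct (data : List String) (out : List Int) : Prop := out = encode_direct_alt data
instance (data : List String) (out : List Int) : Decidable (Spec_encode_direct data out) := by unfold Spec_encode_direct; infer_instance

-- ===== CLAIM (what is proved, stated in full; the proofs are below) =====
def Claim_equal_encode_direct : Prop := ∀ (data : List String), Dom_encode_direct data → Spec_encode_direct data (encode_direct data)

-- ===== LEMMAS AND PROOFS =====

-- the numbering dict A's loop has built after seeing the distinct items S
def pvCodes (S : List String) : PySem.Dict String Int :=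
  PySem.Dict.ofList ((PySem.List.enumerate S).map (fun p => (p.2, p.1 + 1)))

theorem pvCodes_append (S : List String) (x : String) :
    pvCodes (S ++ [x]) = (pvCodes S).insert x ((S.length : Int) + 1) := by
  have hof : ∀ pairs : List (String × Int), PySem.Dict.ofList pairs
      = pairs.foldl (fun d p => d.insert p.1 p.2) PySem.Dict.empty := fun _ => rfl
  simp [pvCodes, PySem.List.enumerate_append, hof, List.foldl_append,
    PySem.List.enumerate_cons]

theorem pvCodes_keys (S : List String) (h : S.Nodup) : (pvCodes S).keys = S := by
  induction S using List.reverseRecOn with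
  | nil => rfl
  | append_singleton S x ih =>
    have hS : S.Nodup := List.Nodup.of_append_left h
    have hx : x ∉ S := by
      simp [List.nodup_append] at h
      intro hmem
      exact h.2 x hmem rfl
    rw [pvCodes_append, PySem.Dict.keys_insert_of_not_contains]
    · rw [ih hS]
    · rw [PySem.Dict.contains_eq_decide_mem_keys, ih hS]
      simp [hx]

theorem pvCodes_getD (S : List String) (h : S.Nodup) (x : String) (hx : x ∈ S) :
    (pvCodes S).getD x 0 = (S.idxOf x : Int) + 1 := by
  induction S using List.reverseRecOn with
  | nil => simp at hx
  | append_singleton S y ih =>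
    have hS : S.Nodup := List.Nodup.of_append_left h
    have hy : y ∉ S := by
      simp [List.nodup_append] at h
      intro hmem
      exact h.2 y hmem rfl
    rw [pvCodes_append, PySem.Dict.getD_insert]
    by_cases hxy : x = y
    · subst hxy
      rw [if_pos rfl, List.idxOf_append_of_notMem hy]
      simp
    · rw [if_neg hxy]
      have hxS : x ∈ S := by
        rcases List.mem_append.mp hx with h' | h'
        · exact h'
        · exact absurd (by simpa using h') hxy
      rw [List.idxOf_append_of_mem hxS, ih hS hxS]

theorem pvCodes_contains (S : List String) (h : S.Nodup) (x : String) :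
    (pvCodes S).contains x = decide (x ∈ S) := by
  rw [PySem.Dict.contains_eq_decide_mem_keys, pvCodes_keys S h]

theorem pvAdd_of_mem (S : List String) (x : String) (h : x ∈ S) : PySem.Set.add S x = S := by
  simp [PySem.Set.add, PySem.Set.contains, h]

theorem pvAdd_of_not_mem (S : List String) (x : String) (h : x ∉ S) :
    PySem.Set.add S x = S ++ [x] := by
  simp [PySem.Set.add, PySem.Set.contains, h]

theorem pvFoldlAdd_append (l S : List String) :
    ∃ t, l.foldl PySem.Set.add S = S ++ t := by
  induction l generalizing S with
  | nil => exact ⟨[], by simp⟩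
  | cons x l ih =>
    obtain ⟨t, ht⟩ := ih (PySem.Set.add S x)
    by_cases hx : x ∈ S
    · exact ⟨t, by rw [List.foldl_cons, ht, pvAdd_of_mem S x hx]⟩
    · exact ⟨x :: t, by rw [List.foldl_cons, ht, pvAdd_of_not_mem S x hx]; simp⟩

theorem pvIdxOf_update (l S : List String) (x : String) (hx : x ∈ S) :
    (PySem.Set.update S l).idxOf x = S.idxOf x := by
  obtain ⟨t, ht⟩ := pvFoldlAdd_append l S
  show (l.foldl PySem.Set.add S).idxOf x = S.idxOf x
  rw [ht, List.idxOf_append_of_mem hx]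

-- the step function of A's loop (definitionally the lambda in encode_direct)
def pvStep (s : PySem.Dict String Int × Int × List Int) (item : String) :
    PySem.Dict String Int × Int × List Int :=
  if s.1.contains item then
    (s.1, s.2.1, s.2.2 ++ [s.1.getD item 0])
  else
    let m' := s.1.insert item s.2.1
    (m', s.2.1 + 1, s.2.2 ++ [m'.getD item 0])

-- the A-loop invariant: with the distinct items S already seen, the loop appends the final codes
theorem pvALoop (rest : List String) (S : List String) (acc : List Int) (h : S.Nodup) :
    (rest.foldl pvStep (pvCodes S, (S.length : Int) + 1, acc)).2.2
    = acc ++ rest.map (fun x => (((PySem.Set.update S rest).idxOf x : Int) + 1)) := by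
  induction rest generalizing S acc with
  | nil => simp
  | cons x rest ih =>
    have hupd : PySem.Set.update S (x :: rest) = PySem.Set.update (PySem.Set.add S x) rest := rfl
    rw [List.foldl_cons]
    by_cases hx : x ∈ S
    · have hstep : pvStep (pvCodes S, (S.length : Int) + 1, acc) x =
          (pvCodes S, (S.length : Int) + 1, acc ++ [(pvCodes S).getD x 0]) := by
        simp [pvStep, pvCodes_contains S h, hx]
      rw [hstep, ih S _ h, pvCodes_getD S h x hx]
      rw [hupd, pvAdd_of_mem S x hx]
      simp only [List.map_cons, List.append_assoc, List.singleton_append]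
      rw [pvIdxOf_update rest S x hx]
    · have hnd : (S ++ [x]).Nodup := by
        simp [List.nodup_append, h]
        intro a ha rfl
        exact hx ha
      have hstep : pvStep (pvCodes S, (S.length : Int) + 1, acc) x =
          (pvCodes (S ++ [x]), ((S ++ [x]).length : Int) + 1,
            acc ++ [(pvCodes (S ++ [x])).getD x 0]) := by
        simp only [pvStep, pvCodes_contains S h, hx, decide_false, Bool.false_eq_true, if_false,
          pvCodes_append]
        refine Prod.ext rfl (Prod.ext ?_ rfl)
        show (S.length : Int) + 1 + 1 = ((S ++ [x]).length : Int) + 1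
        simp
      rw [hstep, ih (S ++ [x]) _ hnd,
        pvCodes_getD (S ++ [x]) hnd x (by simp), List.idxOf_append_of_notMem hx]
      rw [hupd, pvAdd_of_not_mem S x hx]
      simp only [List.map_cons, List.append_assoc, List.singleton_append]
      rw [pvIdxOf_update rest (S ++ [x]) x (by simp), List.idxOf_append_of_notMem hx]

-- A's result, in closed form: the 1-based rank of each element in the distinct-items list
theorem pvA_eq (data : List String) :
    encode_direct data
      = data.map (fun x => (((PySem.Set.ofList data).idxOf x : Int) + 1)) := by
  have hA := pvALoop data [] [] List.nodup_nil
  have hstepeq : pvStep = (fun (s : PySem.Dict String Int × Int × List Int) item =>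
      if s.1.contains item then
        (s.1, s.2.1, s.2.2 ++ [s.1.getD item 0])
      else
        let m' := s.1.insert item s.2.1
        (m', s.2.1 + 1, s.2.2 ++ [m'.getD item 0])) := rfl
  rw [hstepeq] at hA
  have h0 : pvCodes ([] : List String) = PySem.Dict.empty := rfl
  have h1 : PySem.Set.update ([] : List String) data = PySem.Set.ofList data := rfl
  rw [h0, h1] at hA
  unfold encode_direct
  simp only [List.length_nil, Nat.cast_zero, zero_add] at hA
  rw [hA]
  simp

-- B's core: the distinct count of the prefix ending at x's first occurrence is x's 1-based rank
theorem pvPrefixCount (l S : List String) (x : String) (hxS : x ∉ S) (hx : x ∈ l) :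
    (PySem.Set.update S (l.take (l.idxOf x + 1))).length = (PySem.Set.update S l).idxOf x + 1 := by
  induction l generalizing S with
  | nil => simp at hx
  | cons y l ih =>
    have hupd : ∀ t, PySem.Set.update S (y :: t) = PySem.Set.update (PySem.Set.add S y) t :=
      fun _ => rfl
    by_cases hxy : y = x
    · subst hxy
      rw [List.idxOf_cons_self]
      have h1 : (y :: l).take (0 + 1) = [y] := rfl
      rw [h1, hupd]
      have h2 : PySem.Set.update (PySem.Set.add S y) ([] : List String)
          = PySem.Set.add S y := rfl
      rw [h2, hupd, pvAdd_of_not_mem S y hxS,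
        pvIdxOf_update l (S ++ [y]) y (by simp), List.idxOf_append_of_notMem hxS]
      simp
    · have hne : y ≠ x := hxy
      rw [List.idxOf_cons_ne l hne]
      have htake : (y :: l).take (l.idxOf x + 1 + 1) = y :: l.take (l.idxOf x + 1) := rfl
      rw [htake, hupd, hupd]
      have hx' : x ∈ l := by
        rcases List.mem_cons.mp hx with h | h
        · exact absurd h.symm hne
        · exact h
      have hxS' : x ∉ PySem.Set.add S y := by
        by_cases hy : y ∈ S
        · rw [pvAdd_of_mem S y hy]; exact hxS
        · rw [pvAdd_of_not_mem S y hy]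
          simp [hxS, Ne.symm hne]
      exact ih (PySem.Set.add S y) hxS' hx'

theorem pvB_eq (data : List String) :
    encode_direct_alt data
      = data.map (fun x => (((PySem.Set.ofList data).idxOf x : Int) + 1)) := by
  unfold encode_direct_alt
  apply List.map_congr_left
  intro x hx
  have hidx : PySem.List.index? data x = some (data.idxOf x) := by
    rw [PySem.List.index?_eq_idxOf?]
    induction data with
    | nil => simp at hx
    | cons y l ih =>
      by_cases hxy : y = x
      · subst hxy; simp [List.idxOf?_cons]
      · have hx' : x ∈ l := by
          rcases List.mem_cons.mp hx with h | h
          · exact absurd h.symm hxy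
          · exact h
        simp [List.idxOf?_cons, List.idxOf_cons_ne l hxy, hxy, ih hx']
  rw [hidx]
  have hslice : PySem.List.slice data none (some ((data.idxOf x : Int) + 1))
      = data.take (data.idxOf x + 1) := by
    have : ((data.idxOf x : Int) + 1) = ((data.idxOf x + 1 : Nat) : Int) := by push_cast; ring
    rw [this, PySem.List.slice_to_natCast]
  simp only [Option.getD_some]
  rw [hslice]
  have h := pvPrefixCount data [] x (by simp) hx
  have h0 : PySem.Set.update ([] : List String) (data.take (data.idxOf x + 1))
      = PySem.Set.ofList (data.take (data.idxOf x + 1)) := rfl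
  have h1 : PySem.Set.update ([] : List String) data = PySem.Set.ofList data := rfl
  rw [h0, h1] at h
  rw [h]
  push_cast
  ring

-- ===== VERDICT (by name: the statement is the Claim_ definition above) =====
theorem encode_direct_spec : Claim_equal_encode_direct := by
  intro data _
  show encode_direct data = encode_direct_alt data
  rw [pvA_eq, pvB_eq]
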